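-- pv_equiv track=rewrite | github.com/alexhunsley/method-hypnosis | arduino-nano-firmware/scroll_blueline/gen_points_for_place_notation.py | parse_place_notation_sequence
-- ===== SOURCE A (Python) =====
-- def parse_place_notation_sequence(seq):
--     result = []
--     current = ""
--     final_result = []
--
--     for char in seq:
--         if char == ',':
--             if current:
--                 result.append(current)
--                 current = ""
--             final_result.extend(result)
--             final_result.extend(list(reversed(result))[1:])
--             result = []
--         elif char in ".x":
--             if current:
--                 result.append(current)
--                 current = ""
--             if char == 'x':
--                 result.append('x')
--         else:
--             current += char
--
--     if current:
--         result.append(current)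
--
--     final_result.extend(result)
--     return final_result
-- ===== SOURCE B (Python) =====
-- def _tokens(sec):
--     toks = []
--     cur = ""
--     for ch in sec:
--         if ch in ".x":
--             if cur:
--                 toks.append(cur)
--                 cur = ""
--             if ch == 'x':
--                 toks.append('x')
--         else:
--             cur += ch
--     if cur:
--         toks.append(cur)
--     return toks
--
--
-- def parse_place_notation_sequence(seq):
--     sections = seq.split(',')
--     out = []
--     for sec in sections[:-1]:
--         toks = _tokens(sec)
--         out.extend(toks + toks[::-1][1:])
--     out.extend(_tokens(sections[-1]))
--     return out
-- ===== Notes on version B (the rewrite author's own statement) =====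
-- stated objective: simpler
-- what changed: Instead of one global state machine threading result/current/final across the whole string, B splits the input on commas into sections, tokenizes each section independently, and appends each non-final section's tokens followed by their reversed tail (the palindrome), making the comma-level structure explicit.
import Mathlib
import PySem

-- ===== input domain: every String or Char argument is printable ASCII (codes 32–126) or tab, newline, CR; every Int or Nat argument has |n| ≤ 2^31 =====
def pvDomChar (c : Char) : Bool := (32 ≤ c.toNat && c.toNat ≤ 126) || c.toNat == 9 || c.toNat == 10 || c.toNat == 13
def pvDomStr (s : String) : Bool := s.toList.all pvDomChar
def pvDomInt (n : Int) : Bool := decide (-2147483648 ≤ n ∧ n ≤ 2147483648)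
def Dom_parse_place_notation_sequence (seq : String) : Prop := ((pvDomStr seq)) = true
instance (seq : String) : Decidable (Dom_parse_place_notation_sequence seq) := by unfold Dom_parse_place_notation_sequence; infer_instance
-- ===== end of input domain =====

-- B replaces A's single global state machine (result/current/final threaded over the whole
-- string) by splitting on commas and tokenizing each section independently, then palindroming
-- every non-final section; objective: simpler, explicit comma-level structure.

-- ===== PORT A =====
-- strings are represented as List Char (PySem convention); output mapped to String at the end
def pnStepA (st : List (List Char) × List Char × List (List Char)) (c : Char) :
    List (List Char) × List Char × List (List Char) :=
  let (res, cur, fin) := st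
  if c = ',' then
    let res' := if cur ≠ [] then res ++ [cur] else res
    ([], [], fin ++ res' ++ res'.reverse.drop 1)
  else if c = '.' ∨ c = 'x' then
    let res' := if cur ≠ [] then res ++ [cur] else res
    (if c = 'x' then res' ++ [['x']] else res', [], fin)
  else (res, cur ++ [c], fin)

def parse_place_notation_sequence (seq : String) : List String :=
  let st := seq.toList.foldl pnStepA ([], [], [])
  let res := if st.2.1 ≠ [] then st.1 ++ [st.2.1] else st.1
  (st.2.2 ++ res).map String.ofList

-- ===== PORT B =====
def pnFlush (cur : List Char) : List (List Char) := if cur = [] then [] else [cur]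

-- Source B's _tokens: scan the section, accumulating `cur`, flushing on '.' and 'x'
def pnTokens (cur : List Char) : List Char → List (List Char)
  | [] => pnFlush cur
  | c :: cs =>
    if c = '.' then pnFlush cur ++ pnTokens [] cs
    else if c = 'x' then pnFlush cur ++ [['x']] ++ pnTokens [] cs
    else pnTokens (cur ++ [c]) cs

-- Source B's main loop: every section but the last contributes toks ++ toks[::-1][1:]
def pnJoin : List (List Char) → List (List Char)
  | [] => []
  | [s] => pnTokens [] s
  | s :: rest => pnTokens [] s ++ (pnTokens [] s).reverse.drop 1 ++ pnJoin rest

-- seq.split(',') ported as List.splitOn ',' (exact for a one-char separator)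
def parse_place_notation_sequence_alt (seq : String) : List String :=
  (pnJoin (seq.toList.splitOn ',')).map String.ofList

-- ===== PRECONDITION & SPEC =====
def Spec_parse_place_notation_sequence (seq : String) (out : List String) : Prop := out = parse_place_notation_sequence_alt seq
instance (seq : String) (out : List String) : Decidable (Spec_parse_place_notation_sequence seq out) := by unfold Spec_parse_place_notation_sequence; infer_instance

-- ===== CLAIM (what is proved, stated in full; the proofs are below) =====
def Claim_equal_parse_place_notation_sequence : Prop := ∀ (seq : String), Dom_parse_place_notation_sequence seq → Spec_parse_place_notation_sequence seq (parse_place_notation_sequence seq)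

-- ===== LEMMAS AND PROOFS =====

-- B's processing generalized by the state (res, cur) carried into the FIRST section
def pnJoinFrom (res : List (List Char)) (cur : List Char) : List (List Char) → List (List Char)
  | [] => res ++ pnFlush cur
  | [s] => res ++ pnTokens cur s
  | s :: rest =>
    (res ++ pnTokens cur s) ++ (res ++ pnTokens cur s).reverse.drop 1 ++ pnJoinFrom [] [] rest

lemma pnJoinFrom_nil_nil (secs : List (List Char)) :
    pnJoinFrom [] [] secs = pnJoin secs := by
  induction secs with
  | nil => simp [pnJoinFrom, pnJoin, pnFlush]
  | cons s rest ih =>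
    cases rest with
    | nil => simp [pnJoinFrom, pnJoin]
    | cons t r => simp [pnJoinFrom, pnJoin, ih]

lemma pnJoinFrom_congr (res res' : List (List Char)) (cur cur' : List Char)
    (s s' : List Char) (rest : List (List Char))
    (h : res ++ pnTokens cur s = res' ++ pnTokens cur' s') :
    pnJoinFrom res cur (s :: rest) = pnJoinFrom res' cur' (s' :: rest) := by
  cases rest with
  | nil => simpa [pnJoinFrom] using h
  | cons t r => simp [pnJoinFrom, h]

lemma splitOn_comma_cons (cs : List Char) :
    (',' :: cs).splitOn ',' = [] :: cs.splitOn ',' := by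
  simp [List.splitOn, List.splitOnP_cons]

lemma splitOn_other_cons (cs : List Char) (c : Char) (h : c ≠ ',') :
    (c :: cs).splitOn ',' = (cs.splitOn ',').modifyHead (c :: ·) := by
  simp [List.splitOn, List.splitOnP_cons, h]

lemma splitOn_ne_nil (cs : List Char) : cs.splitOn ',' ≠ [] :=
  List.splitOnP_ne_nil _ _

lemma pnJoinFrom_empty_head (res : List (List Char)) (cur : List Char)
    (secs : List (List Char)) (h : secs ≠ []) :
    pnJoinFrom res cur ([] :: secs) =
      (res ++ pnFlush cur) ++ ((res ++ pnFlush cur).reverse.drop 1 ++ pnJoinFrom [] [] secs) := by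
  cases secs with
  | nil => exact absurd rfl h
  | cons s rest => simp [pnJoinFrom, pnTokens]

-- main invariant: A's fold from any state equals B's per-section processing
lemma pnMain (cs : List Char) :
    ∀ (res : List (List Char)) (cur : List Char) (fin : List (List Char)),
    (let st := cs.foldl pnStepA (res, cur, fin)
     st.2.2 ++ (if st.2.1 ≠ [] then st.1 ++ [st.2.1] else st.1))
    = fin ++ pnJoinFrom res cur (cs.splitOn ',') := by
  induction cs with
  | nil =>
    intro res cur fin
    simp only [List.foldl_nil, List.splitOn_nil]
    by_cases h : cur = [] <;> simp [pnJoinFrom, pnTokens, pnFlush, h]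
  | cons c cs ih =>
    intro res cur fin
    by_cases hc : c = ','
    · subst hc
      rw [splitOn_comma_cons]
      rw [pnJoinFrom_empty_head _ _ _ (splitOn_ne_nil cs)]
      have : (',' :: cs).foldl pnStepA (res, cur, fin)
          = cs.foldl pnStepA
              ([], [], fin ++ (if cur ≠ [] then res ++ [cur] else res)
                ++ (if cur ≠ [] then res ++ [cur] else res).reverse.drop 1) := by
        simp [pnStepA]
      rw [this, ih]
      rw [pnJoinFrom_nil_nil]
      by_cases h : cur = [] <;> simp [pnFlush, h]
    · obtain ⟨s, rest, hsplit⟩ : ∃ s rest, cs.splitOn ',' = s :: rest := by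
        cases h : cs.splitOn ',' with
        | nil => exact absurd h (splitOn_ne_nil cs)
        | cons s rest => exact ⟨s, rest, rfl⟩
      rw [splitOn_other_cons cs c hc, hsplit, List.modifyHead]
      by_cases hd : c = '.'
      · subst hd
        have hstep : ('.' :: cs).foldl pnStepA (res, cur, fin)
            = cs.foldl pnStepA ((if cur ≠ [] then res ++ [cur] else res), [], fin) := by
          simp [pnStepA]
        rw [hstep, ih, hsplit]
        congr 1
        refine pnJoinFrom_congr _ _ _ _ _ _ _ ?_
        by_cases h : cur = [] <;> simp [pnTokens, pnFlush, h]
      · by_cases hx : c = 'x'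
        · subst hx
          have hstep : ('x' :: cs).foldl pnStepA (res, cur, fin)
              = cs.foldl pnStepA ((if cur ≠ [] then res ++ [cur] else res) ++ [['x']], [], fin) := by
            simp [pnStepA]
          rw [hstep, ih, hsplit]
          congr 1
          refine pnJoinFrom_congr _ _ _ _ _ _ _ ?_
          by_cases h : cur = [] <;> simp [pnTokens, pnFlush, h]
        · have hstep : (c :: cs).foldl pnStepA (res, cur, fin)
              = cs.foldl pnStepA (res, cur ++ [c], fin) := by
            simp [pnStepA, hc, hd, hx]
          rw [hstep, ih, hsplit]
          congr 1
          refine pnJoinFrom_congr _ _ _ _ _ _ _ ?_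
          simp [pnTokens, hd, hx]

-- ===== VERDICT (by name: the statement is the Claim_ definition above) =====
theorem parse_place_notation_sequence_spec : Claim_equal_parse_place_notation_sequence := by
  intro seq _
  unfold Spec_parse_place_notation_sequence parse_place_notation_sequence parse_place_notation_sequence_alt
  have h := pnMain seq.toList [] [] []
  simp only [List.nil_append] at h
  show ((seq.toList.foldl pnStepA ([], [], [])).2.2 ++
      (if (seq.toList.foldl pnStepA ([], [], [])).2.1 ≠ [] then
        (seq.toList.foldl pnStepA ([], [], [])).1 ++ [(seq.toList.foldl pnStepA ([], [], [])).2.1]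
      else (seq.toList.foldl pnStepA ([], [], [])).1)).map String.ofList
    = (pnJoin (seq.toList.splitOn ',')).map String.ofList
  rw [h, pnJoinFrom_nil_nil]
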